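-- pv_equiv track=rewrite | github.com/bconrad98/PairProgramming | BabyNames.py | single_decade_rank
-- ===== SOURCE A (Python) =====
-- def get_decade_index(decade):
--     digits = decade%100
--     if (decade < 2000):
--         index = digits//10
--     else:
--         index = 10
--     return index
--
-- def single_decade_rank(name_dict,decade):
--     name_list = []
--     index = get_decade_index(decade)
--     for i in range(1,1001):
--         for name in name_dict:
--             if (name_dict[name][index] == i):
--                 name_list.append(name)
--     return name_list
-- ===== SOURCE B (Python) =====
-- def get_decade_index(decade):
--     digits = decade%100
--     if (decade < 2000):
--         index = digits//10
--     else: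
--         index = 10
--     return index
--
-- def single_decade_rank(name_dict, decade):
--     index = get_decade_index(decade)
--     buckets = {}
--     for name in name_dict:
--         buckets.setdefault(name_dict[name][index], []).append(name)
--     name_list = []
--     for i in range(1, 1001):
--         name_list.extend(buckets.get(i, []))
--     return name_list
-- ===== Notes on version B (the rewrite author's own statement) =====
-- stated objective: faster
-- what changed: Replaces A's 1000 full rescans of name_dict with one bucketing pass (rank -> names in dict order) followed by a single ordered emission over ranks 1..1000 (counting-sort style).
import Mathlib
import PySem

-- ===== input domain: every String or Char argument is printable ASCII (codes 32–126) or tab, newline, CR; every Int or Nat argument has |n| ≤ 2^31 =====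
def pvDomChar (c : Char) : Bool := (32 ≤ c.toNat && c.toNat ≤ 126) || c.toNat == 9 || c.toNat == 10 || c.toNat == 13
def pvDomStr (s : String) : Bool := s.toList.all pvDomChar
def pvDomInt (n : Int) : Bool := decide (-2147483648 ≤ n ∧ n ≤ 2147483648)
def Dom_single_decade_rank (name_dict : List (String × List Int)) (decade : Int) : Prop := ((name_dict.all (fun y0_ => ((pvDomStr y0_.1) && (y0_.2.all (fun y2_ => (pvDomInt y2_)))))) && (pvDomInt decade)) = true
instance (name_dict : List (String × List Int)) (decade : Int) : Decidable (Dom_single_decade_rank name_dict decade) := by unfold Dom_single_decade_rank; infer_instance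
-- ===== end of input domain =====

-- B replaces A's 1000 rescans of name_dict with one bucketing pass plus one ordered
-- emission over ranks 1..1000 (objective: faster by the asymptotic change O(1000*n) -> O(n+1000)).

-- ===== PORT A =====
-- shared helper (identical in Source A and Source B)
def get_decade_index (decade : Int) : Int :=
  let digits := PySem.Int.mod decade 100
  if decade < 2000 then PySem.Int.floordiv digits 10 else 10

def single_decade_rank (name_dict : List (String × List Int)) (decade : Int) : List String :=
  let index := get_decade_index decade
  (PySem.List.pyRange 1 1001 1).foldl (fun name_list i =>
    name_dict.foldl (fun acc p =>
      if PySem.List.pyGet? p.2 index == some i then acc ++ [p.1] else acc) name_list) []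

-- ===== PORT B =====
def single_decade_rank_alt (name_dict : List (String × List Int)) (decade : Int) : List String :=
  let index := get_decade_index decade
  let buckets : PySem.Dict Int (List String) :=
    name_dict.foldl (fun d p =>
      match PySem.List.pyGet? p.2 index with
      | some r => d.modify r [] (· ++ [p.1])   -- buckets.setdefault(rank, []).append(name)
      | none => d) PySem.Dict.empty            -- unreachable under Pre_ (Python raises IndexError there)
  (PySem.List.pyRange 1 1001 1).foldl (fun name_list i => name_list ++ buckets.getD i []) []

-- ===== PRECONDITION & SPEC =====
-- Pre_ excludes exactly: rank lists too short for the decade's index (Python A raises IndexError),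
-- and duplicate name keys (impossible in a Python dict, whose role the association list plays).
def Pre_single_decade_rank (name_dict : List (String × List Int)) (decade : Int) : Prop :=
  (name_dict.map Prod.fst).Nodup ∧ ∀ p ∈ name_dict, get_decade_index decade < (p.2.length : Int)
instance (name_dict : List (String × List Int)) (decade : Int) : Decidable (Pre_single_decade_rank name_dict decade) := by unfold Pre_single_decade_rank; infer_instance

def pvWitness_single_decade_rank : (List (String × List Int)) × Int :=
  ([("Amy", [5, 2, 3, 4, 5, 6, 7, 8, 9, 1, 11]), ("Bob", [1, 1, 1, 1, 1, 1, 1, 1, 1, 2, 1])], 1990)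

def Spec_single_decade_rank (name_dict : List (String × List Int)) (decade : Int) (out : List String) : Prop := out = single_decade_rank_alt name_dict decade
instance (name_dict : List (String × List Int)) (decade : Int) (out : List String) : Decidable (Spec_single_decade_rank name_dict decade out) := by unfold Spec_single_decade_rank; infer_instance

-- ===== CLAIM (what is proved, stated in full; the proofs are below) =====
def Claim_equal_single_decade_rank : Prop := ∀ (name_dict : List (String × List Int)) (decade : Int), Dom_single_decade_rank name_dict decade → Pre_single_decade_rank name_dict decade → Spec_single_decade_rank name_dict decade (single_decade_rank name_dict decade)

-- ===== LEMMAS AND PROOFS =====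

-- the bucket built by B's first pass holds, at key i, exactly the names A's inner scan collects for i
theorem bucket_getD (index i : Int) (nd : List (String × List Int)) (d : PySem.Dict Int (List String)) :
    (nd.foldl (fun d p =>
      match PySem.List.pyGet? p.2 index with
      | some r => d.modify r [] (· ++ [p.1])
      | none => d) d).getD i []
    = d.getD i [] ++ (nd.filter (fun p => PySem.List.pyGet? p.2 index == some i)).map Prod.fst := by
  induction nd generalizing d with
  | nil => simp
  | cons p t ih =>
    simp only [List.foldl_cons, List.filter_cons]
    cases h : PySem.List.pyGet? p.2 index with
    | none => rw [ih]; simp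
    | some r =>
      by_cases hri : r = i
      · subst hri
        rw [ih]; simp [PySem.Dict.getD_modify_self]
      · rw [ih]; simp [hri, PySem.Dict.getD_modify_of_ne _ _ _ (Ne.symm hri)]

theorem single_decade_rank_spec : Claim_equal_single_decade_rank := by
  intro nd decade _ _
  unfold Spec_single_decade_rank single_decade_rank single_decade_rank_alt
  dsimp only
  refine PySem.List.foldl_congr_mem _ _ _ _ ?_
  intro acc i _
  rw [bucket_getD, PySem.List.foldl_append_if (fun p => PySem.List.pyGet? p.2 (get_decade_index decade) == some i) Prod.fst]
  simp
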